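-- pv_equiv track=rewrite | github.com/wsher0901/Weekly_Meeting_Dashboard_Visualization | Functions/Visualization/New_Allele_Visualization2.py | label_maker
-- ===== SOURCE A (Python) =====
-- def label_maker(data,gene,frei,area):
--     if len(data[gene][frei][area]) == 1:
--         return [[data[gene][frei][area][0][1],
--                 data[gene][frei][area][0][1],
--                 0]]
--     else:
--         temp = []
--         prev = data[gene][frei][area][0][1]
--         start = prev
--         count = 0
--         for ind,i in enumerate(data[gene][frei][area][1:],1):
--             pos = i[1]
--             if pos - prev <= 4:
--                 prev = pos
--                 count+=1
--                 if ind == len(data[gene][frei][area])-1: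
--                     temp.append([start,prev,count])
--
--             else:
--                 temp.append([start,prev,count])
--                 prev = pos
--                 start = prev
--                 count = 0
--                 if ind == len(data[gene][frei][area])-1:
--                     temp.append([start,prev,count])
--
--         return temp
-- ===== SOURCE B (Python) =====
-- def label_maker(data, gene, frei, area):
--     pos = [x[1] for x in data[gene][frei][area]]
--     rev = pos[::-1]
--     out = [[rev[0], rev[0], 0]]
--     for p, q in zip(rev[1:], rev):
--         if q - p <= 4:
--             first = out[0]
--             out[0] = [p, first[1], first[2] + 1]
--         else:
--             out = [[p, p, 0]] + out
--     return out
-- ===== Notes on version B (the rewrite author's own statement) =====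
-- stated objective: alternative
-- what changed: Replaces A's forward single pass with mutable prev/start/count state and a duplicated last-index special case by a right-to-left construction: reverse the positions, pair each element with its right neighbour via zip, and build the output back-to-front, either merging an element into the current front group or prepending a fresh singleton group; no index/length bookkeeping remains.
import Mathlib
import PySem

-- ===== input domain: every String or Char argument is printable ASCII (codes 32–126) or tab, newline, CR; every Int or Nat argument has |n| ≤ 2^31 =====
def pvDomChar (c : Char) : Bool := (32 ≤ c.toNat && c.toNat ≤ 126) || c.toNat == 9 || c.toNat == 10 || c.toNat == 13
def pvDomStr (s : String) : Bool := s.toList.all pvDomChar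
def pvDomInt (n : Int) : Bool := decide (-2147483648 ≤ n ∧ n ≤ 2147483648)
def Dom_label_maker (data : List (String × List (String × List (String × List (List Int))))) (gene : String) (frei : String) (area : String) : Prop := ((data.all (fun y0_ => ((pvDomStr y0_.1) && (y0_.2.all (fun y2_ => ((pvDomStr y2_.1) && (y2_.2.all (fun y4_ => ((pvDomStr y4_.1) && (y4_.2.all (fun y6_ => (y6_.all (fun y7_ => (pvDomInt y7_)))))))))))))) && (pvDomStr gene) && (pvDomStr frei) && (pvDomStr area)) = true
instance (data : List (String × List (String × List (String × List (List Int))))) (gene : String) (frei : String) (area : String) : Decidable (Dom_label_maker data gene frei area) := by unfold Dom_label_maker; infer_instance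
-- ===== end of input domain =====

-- B replaces A's forward pass (mutable prev/start/count, duplicated last-index special
-- case) by a right-to-left construction: reverse the positions, zip each element with its
-- right neighbour, and build the output back-to-front, merging into the front group or
-- prepending a fresh one; objective: alternative decomposition (not faster).

-- shared data access: data[gene][frei][area] (none = KeyError, excluded by Pre_)
def pvEntries? (data : List (String × List (String × List (String × List (List Int))))) (gene : String) (frei : String) (area : String) : Option (List (List Int)) :=
  ((PySem.Dict.mk data).get? gene).bind fun d2 =>
    ((PySem.Dict.mk d2).get? frei).bind fun d3 =>
      (PySem.Dict.mk d3).get? area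

-- i[1] for an item (IndexError = none, excluded by Pre_; default irrelevant under Pre_)
def pvPos1 (i : List Int) : Int := (PySem.List.pyGet? i 1).getD 0

-- ===== PORT A =====
-- A's for-loop over data[...][1:] with enumerate(..,1); state (temp, prev, start, count)
def label_maker_loopA (n : Nat) : (ind : Nat) → (rest : List (List Int)) → (temp : List (List Int)) → (prev start count : Int) → List (List Int)
  | _, [], temp, _, _, _ => temp
  | ind, i :: rs, temp, prev, start, count =>
    let pos := pvPos1 i
    if pos - prev ≤ 4 then
      let prev' := pos
      let count' := count + 1
      let temp' := if ind = n - 1 then temp ++ [[start, prev', count']] else temp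
      label_maker_loopA n (ind + 1) rs temp' prev' start count'
    else
      let temp' := temp ++ [[start, prev, count]]
      let prev' := pos
      let start' := prev'
      let count' := 0
      let temp'' := if ind = n - 1 then temp' ++ [[start', prev', count']] else temp'
      label_maker_loopA n (ind + 1) rs temp'' prev' start' count'

def label_maker (data : List (String × List (String × List (String × List (List Int))))) (gene : String) (frei : String) (area : String) : List (List Int) :=
  let lst := (pvEntries? data gene frei area).getD []
  if lst.length = 1 then
    [[pvPos1 ((PySem.List.pyGet? lst 0).getD []),
      pvPos1 ((PySem.List.pyGet? lst 0).getD []),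
      0]]
  else
    let prev := pvPos1 ((PySem.List.pyGet? lst 0).getD [])
    let start := prev
    let count : Int := 0
    label_maker_loopA lst.length 1 (lst.drop 1) [] prev start count

-- ===== PORT B =====
-- loop body: out[0] = [p, first[1], first[2]+1]  or  out = [[p,p,0]] + out
def bStep (out : List (List Int)) (pq : Int × Int) : List (List Int) :=
  if pq.2 - pq.1 ≤ 4 then
    let first := out.headD []
    [pq.1, (PySem.List.pyGet? first 1).getD 0, (PySem.List.pyGet? first 2).getD 0 + 1] :: out.drop 1
  else
    [pq.1, pq.1, 0] :: out

def label_maker_alt (data : List (String × List (String × List (String × List (List Int))))) (gene : String) (frei : String) (area : String) : List (List Int) :=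
  let lst := (pvEntries? data gene frei area).getD []
  let pos := lst.map pvPos1
  let rev := (PySem.List.slice? pos none none (-1)).getD []   -- pos[::-1] (step ≠ 0, always some)
  let rev0 := (PySem.List.pyGet? rev 0).getD 0                -- rev[0] (IndexError on empty, excluded by Pre_)
  ((rev.drop 1).zip rev).foldl bStep [[rev0, rev0, 0]]        -- for p, q in zip(rev[1:], rev)

-- ===== PRECONDITION & SPEC =====
-- A raises KeyError when a key is missing and IndexError on an empty entry list or an
-- item shorter than 2; Pre_ excludes exactly those raising inputs (A returns everywhere else).
def Pre_label_maker (data : List (String × List (String × List (String × List (List Int))))) (gene : String) (frei : String) (area : String) : Prop :=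
  (pvEntries? data gene frei area).isSome = true ∧
  ∀ lst ∈ (pvEntries? data gene frei area).toList, lst ≠ [] ∧ ∀ x ∈ lst, 2 ≤ x.length
instance (data : List (String × List (String × List (String × List (List Int))))) (gene : String) (frei : String) (area : String) : Decidable (Pre_label_maker data gene frei area) := by unfold Pre_label_maker; infer_instance

def pvWitness_label_maker : (List (String × List (String × List (String × List (List Int))))) × String × String × String :=
  ([("g", [("f", [("a", [[0, 1], [0, 3], [0, 10]])])])], "g", "f", "a")

def Spec_label_maker (data : List (String × List (String × List (String × List (List Int))))) (gene : String) (frei : String) (area : String) (out : List (List Int)) : Prop := out = label_maker_alt data gene frei area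
instance (data : List (String × List (String × List (String × List (List Int))))) (gene : String) (frei : String) (area : String) (out : List (List Int)) : Decidable (Spec_label_maker data gene frei area out) := by unfold Spec_label_maker; infer_instance

-- ===== CLAIM (what is proved, stated in full; the proofs are below) =====
def Claim_equal_label_maker : Prop := ∀ (data : List (String × List (String × List (String × List (List Int))))) (gene : String) (frei : String) (area : String), Dom_label_maker data gene frei area → Pre_label_maker data gene frei area → Spec_label_maker data gene frei area (label_maker data gene frei area)

-- ===== LEMMAS AND PROOFS =====

-- the label of a finished run of positions
def pvRunLabel (g : List Int) : List Int := [g.headD 0, g.getLastD 0, (g.length : Int) - 1]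

-- forward run-splitting with an accumulator (proof-only intermediate between A and B)
def pvRunsAcc : (ps : List Int) → (current : List Int) → (groups : List (List Int)) → List (List Int)
  | [], current, groups => groups ++ [current]
  | p :: rest, current, groups =>
    if p - current.getLastD 0 ≤ 4 then
      pvRunsAcc rest (current ++ [p]) groups
    else
      pvRunsAcc rest [p] (groups ++ [current])

-- B's recursive back-to-front spec: groups of p :: rest, built from the right
def pvG : Int → List Int → List (List Int)
  | p, [] => [[p, p, 0]]
  | p, q :: rest => bStep (pvG q rest) (p, q)

def pvMergeHead (c : List Int) : List (List Int) → List (List Int)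
  | [] => []
  | g :: t => (c ++ g) :: t

-- ===== A-side: loop = forward runs =====
theorem label_maker_loop_eq (rest : List (List Int)) (cur : List Int) (groups : List (List Int)) (ind n : Nat)
    (hcur : cur ≠ []) (hrest : rest ≠ []) (hn : ind + rest.length = n) (hind : 1 ≤ ind) :
    label_maker_loopA n ind rest (groups.map pvRunLabel) (cur.getLastD 0) (cur.headD 0) ((cur.length : Int) - 1)
      = (pvRunsAcc (rest.map pvPos1) cur groups).map pvRunLabel := by
  induction rest generalizing cur groups ind with
  | nil => exact absurd rfl hrest
  | cons i rs ih =>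
    simp only [List.map_cons]
    rcases rs with _ | ⟨j, rs'⟩
    · -- last element: ind = n - 1
      have hlast : ind = n - 1 := by simp at hn; omega
      by_cases hle : pvPos1 i - cur.getLastD 0 ≤ 4
      · rw [label_maker_loopA, pvRunsAcc]
        simp only [hle, if_pos, if_pos hlast, List.map_nil]
        rw [label_maker_loopA, pvRunsAcc]
        have h1 : (cur ++ [pvPos1 i]).headD 0 = cur.headD 0 := by
          cases cur with | nil => exact absurd rfl hcur | cons a t => simp
        have h2 : (cur ++ [pvPos1 i]).getLastD 0 = pvPos1 i := by simp
        rcases List.exists_cons_of_ne_nil hcur with ⟨a, t, rfl⟩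
        have h4 : (a :: (t ++ [pvPos1 i])).getLast?.getD 0 = pvPos1 i := by
          rw [show a :: (t ++ [pvPos1 i]) = (a :: t) ++ [pvPos1 i] from rfl, List.getLast?_concat]
          rfl
        simp [pvRunLabel, h4]
      · rw [label_maker_loopA, pvRunsAcc]
        simp only [hle, if_pos hlast, ite_false, List.map_nil]
        rw [label_maker_loopA, pvRunsAcc]
        simp [pvRunLabel]
    · -- not the last element: ind ≠ n - 1
      have hnl : ind ≠ n - 1 := by simp at hn; omega
      by_cases hle : pvPos1 i - cur.getLastD 0 ≤ 4
      · rw [label_maker_loopA, pvRunsAcc]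
        simp only [hle, if_pos, if_neg hnl]
        have h1 : (cur ++ [pvPos1 i]).headD 0 = cur.headD 0 := by
          cases cur with | nil => exact absurd rfl hcur | cons a t => simp
        have h2 : (cur ++ [pvPos1 i]).getLastD 0 = pvPos1 i := by simp
        have h3 : ((cur ++ [pvPos1 i]).length : Int) - 1 = (cur.length : Int) - 1 + 1 := by
          simp
        have H := ih (cur ++ [pvPos1 i]) groups (ind + 1) (by simp) (by simp)
          (by simp at hn ⊢; omega) (by omega)
        rw [h1, h2, h3] at H
        exact H
      · rw [label_maker_loopA, pvRunsAcc]
        simp only [hle, if_neg hnl, ite_false]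
        have H := ih [pvPos1 i] (groups ++ [cur]) (ind + 1) (by simp) (by simp)
          (by simp at hn ⊢; omega) (by omega)
        simpa [pvRunLabel] using H

-- ===== runs bookkeeping =====
theorem pvRunsAcc_ne_nil (ps : List Int) (cur : List Int) (gs : List (List Int)) :
    pvRunsAcc ps cur gs ≠ [] := by
  induction ps generalizing cur gs with
  | nil => simp [pvRunsAcc]
  | cons p rest ih => rw [pvRunsAcc]; split_ifs <;> exact ih _ _

theorem pvRunsAcc_mem_ne_nil (ps : List Int) (cur : List Int) (gs : List (List Int))
    (hcur : cur ≠ []) (hgs : ∀ g ∈ gs, g ≠ []) : ∀ g ∈ pvRunsAcc ps cur gs, g ≠ [] := by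
  induction ps generalizing cur gs with
  | nil =>
    intro g hg
    rw [pvRunsAcc] at hg
    rcases List.mem_append.mp hg with h | h
    · exact hgs g h
    · simp at h; subst h; exact hcur
  | cons p rest ih =>
    intro g hg
    rw [pvRunsAcc] at hg
    split_ifs at hg with h
    · exact ih (cur ++ [p]) gs (by simp) hgs g hg
    · refine ih [p] (gs ++ [cur]) (by simp) ?_ g hg
      intro g' hg'
      rcases List.mem_append.mp hg' with h' | h'
      · exact hgs g' h'
      · simp at h'; subst h'; exact hcur

theorem pvRunsAcc_append (ps : List Int) (cur : List Int) (gs : List (List Int)) :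
    pvRunsAcc ps cur gs = gs ++ pvRunsAcc ps cur [] := by
  induction ps generalizing cur gs with
  | nil => simp [pvRunsAcc]
  | cons p rest ih =>
    rw [pvRunsAcc, pvRunsAcc]
    split_ifs with h
    · exact ih _ _
    · rw [ih [p] (gs ++ [cur]), List.nil_append, ih [p] [cur]]
      simp

theorem pvMergeHead_append (a b : List Int) (l : List (List Int)) :
    pvMergeHead (a ++ b) l = pvMergeHead a (pvMergeHead b l) := by
  cases l with
  | nil => rfl
  | cons g t => simp [pvMergeHead]

theorem pvRunsAcc_merge (ps : List Int) (c : List Int) (x : Int) :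
    pvRunsAcc ps (c ++ [x]) [] = pvMergeHead c (pvRunsAcc ps [x] []) := by
  induction ps generalizing c x with
  | nil => simp [pvRunsAcc, pvMergeHead]
  | cons p rest ih =>
    rw [pvRunsAcc, pvRunsAcc]
    have hlast : (c ++ [x]).getLastD 0 = x := by simp
    rw [hlast, show ([x] : List Int).getLastD 0 = x from rfl]
    split_ifs with h
    · rw [ih (c ++ [x]) p, ih [x] p, pvMergeHead_append]
    · simp only [List.nil_append]
      rw [pvRunsAcc_append rest [p] [c ++ [x]], pvRunsAcc_append rest [p] [[x]]]
      rfl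

-- ===== B-side: recursive spec = forward runs =====
theorem pvG_eq_runs (rest : List Int) (p : Int) :
    pvG p rest = (pvRunsAcc rest [p] []).map pvRunLabel := by
  induction rest generalizing p with
  | nil => simp [pvG, pvRunsAcc, pvRunLabel]
  | cons q rs ih =>
    rw [pvG, pvRunsAcc, show ([p] : List Int).getLastD 0 = p from rfl]
    split_ifs with h
    · rw [pvRunsAcc_merge rs [p] q]
      obtain ⟨g, t, hgt⟩ : ∃ g t, pvRunsAcc rs [q] [] = g :: t := by
        rcases hE : pvRunsAcc rs [q] [] with _ | ⟨g, t⟩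
        · exact absurd hE (pvRunsAcc_ne_nil rs [q] [])
        · exact ⟨g, t, rfl⟩
      have hgne : g ≠ [] := pvRunsAcc_mem_ne_nil rs [q] [] (by simp) (by simp) g (by rw [hgt]; simp)
      rw [hgt, ih q, hgt]
      rcases List.exists_cons_of_ne_nil hgne with ⟨a, t', rfl⟩
      simp only [bStep, h, if_pos, pvMergeHead, List.map_cons]
      simp [pvRunLabel, PySem.List.pyGet?, PySem.List.pyIdx?]
    · simp only [List.nil_append]
      rw [pvRunsAcc_append rs [q] [[p]]]
      simp [bStep, h, ih q, pvRunLabel]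

-- ===== B-side: the zip-pairs fold computes the recursive spec =====
theorem zip_concat_pairs (t : List Int) (h p : Int) :
    (t ++ [p]).zip (h :: (t ++ [p])) = t.zip (h :: t) ++ [(p, (h :: t).getLastD 0)] := by
  induction t generalizing h with
  | nil => simp
  | cons a t' ih =>
    simp only [List.cons_append, List.zip_cons_cons, ih a, List.getLastD_cons]

theorem pairs_reverse_concat (p q : Int) (rs : List Int) :
    (((p :: q :: rs).reverse).drop 1).zip ((p :: q :: rs).reverse)
      = (((q :: rs).reverse).drop 1).zip ((q :: rs).reverse) ++ [(p, q)] := by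
  obtain ⟨h, t, ht⟩ : ∃ h t, (q :: rs).reverse = h :: t := by
    rcases hE : (q :: rs).reverse with _ | ⟨h, t⟩
    · simpa using congrArg List.length hE
    · exact ⟨h, t, rfl⟩
  have hrev : (p :: q :: rs).reverse = h :: (t ++ [p]) := by
    rw [List.reverse_cons, ht]; rfl
  have hlastq : (h :: t).getLastD 0 = q := by
    rw [← ht, List.getLastD_eq_getLast?, List.getLast?_reverse]
    rfl
  rw [hrev, ht, List.drop_one, List.drop_one, List.tail_cons, List.tail_cons,
    zip_concat_pairs, hlastq]

theorem foldl_pairs_eq_pvG (rest : List Int) (p : Int) :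
    (((p :: rest).reverse.drop 1).zip ((p :: rest).reverse)).foldl bStep
        [[(p :: rest).getLastD 0, (p :: rest).getLastD 0, 0]] = pvG p rest := by
  induction rest generalizing p with
  | nil => simp [pvG]
  | cons q rs ih =>
    rw [pairs_reverse_concat, List.foldl_append]
    have hlast : (p :: q :: rs).getLastD 0 = (q :: rs).getLastD 0 := by
      simp
    rw [hlast, ih q]
    rfl

-- B's fold over the reversed-zip pairs computes the forward-run labels
theorem alt_fold_eq_runs (P : Int) (Ps : List Int) :
    (((P :: Ps).reverse.tail).zip ((P :: Ps).reverse)).foldl bStep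
        [[(PySem.List.pyGet? (P :: Ps).reverse 0).getD 0,
          (PySem.List.pyGet? (P :: Ps).reverse 0).getD 0, 0]]
      = (pvRunsAcc Ps [P] []).map pvRunLabel := by
  have hrev0 : (PySem.List.pyGet? (P :: Ps).reverse 0).getD 0 = (P :: Ps).getLastD 0 := by
    rw [PySem.List.pyGet?_zero, ← List.head?_eq_getElem?, List.head?_reverse,
      List.getLastD_eq_getLast?]
  rw [hrev0, ← List.drop_one, foldl_pairs_eq_pvG Ps P, pvG_eq_runs Ps P]

-- ===== VERDICT (by name: the statement is the Claim_ definition above) =====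
theorem label_maker_spec : Claim_equal_label_maker := by
  intro data gene frei area _ hpre
  obtain ⟨hsome, hall⟩ := hpre
  obtain ⟨lst, hlst⟩ := Option.isSome_iff_exists.mp hsome
  obtain ⟨hne, _⟩ := hall lst (by simp [hlst])
  show label_maker data gene frei area = label_maker_alt data gene frei area
  unfold label_maker label_maker_alt
  rw [hlst]
  simp only [Option.getD_some]
  rcases lst with _ | ⟨i0, rest⟩
  · exact absurd rfl hne
  · rcases rest with _ | ⟨i1, rest'⟩
    · -- length 1
      simp [PySem.List.slice?_none_none_neg_one]
    · -- length ≥ 2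
      have hlen : (i0 :: i1 :: rest').length ≠ 1 := by simp
      simp only [if_neg hlen, List.drop_one, List.tail_cons, List.map_cons]
      have h0 : (PySem.List.pyGet? (i0 :: i1 :: rest') 0).getD [] = i0 := by
        simp [PySem.List.pyGet?_zero]
      rw [h0]
      have HA := label_maker_loop_eq (i1 :: rest') [pvPos1 i0] [] 1 (i0 :: i1 :: rest').length
        (by simp) (by simp) (by simp only [List.length_cons]; omega) (by omega)
      have e1 : ([pvPos1 i0] : List Int).getLastD 0 = pvPos1 i0 := rfl
      have e2 : ([pvPos1 i0] : List Int).headD 0 = pvPos1 i0 := rfl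
      have e3 : (([pvPos1 i0] : List Int).length : Int) - 1 = 0 := by norm_num
      rw [e1, e2, e3, List.map_nil] at HA
      -- B side: reduce the reversed-zip fold to pvG, then to the runs
      rw [PySem.List.slice?_none_none_neg_one, Option.getD_some,
        alt_fold_eq_runs (pvPos1 i0) (pvPos1 i1 :: rest'.map pvPos1)]
      simp only [List.map_cons] at HA
      exact HA
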